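-- pv_equiv track=rewrite | github.com/dm-nekipielov/HW_Hillel | HW14/strings_in_max_depth.py | strings_in_max_depth
-- ===== SOURCE A (Python) =====
-- def strings_in_max_depth(s: str):
--     stage = 0
--     start_index = 0
--     result = []
--     if '(' not in s:
--         result.append(s)
--     else:
--         current_stage = 0
--         for index, symbol in enumerate(s):
--             if symbol == '(':
--                 start_index = index + 1
--                 current_stage += 1
--             elif symbol == ')':
--                 if current_stage == stage:
--                     result.append(s[start_index:index])
--                 current_stage -= 1
--             if current_stage > stage:
--                 result = []
--                 stage = current_stage
--     return result
-- ===== SOURCE B (Python) =====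
-- def strings_in_max_depth(s: str):
--     if '(' not in s:
--         return [s]
--     # pass 1: find the maximum nesting depth
--     depth = 0
--     max_depth = 0
--     for ch in s:
--         if ch == '(':
--             depth += 1
--             if depth > max_depth:
--                 max_depth = depth
--         elif ch == ')':
--             depth -= 1
--     # pass 2: collect substrings closed at maximum depth
--     result = []
--     depth = 0
--     start = 0
--     for index, ch in enumerate(s):
--         if ch == '(':
--             start = index + 1
--             depth += 1
--         elif ch == ')':
--             if depth == max_depth:
--                 result.append(s[start:index])
--             depth -= 1
--     return result
-- ===== Notes on version B (the rewrite author's own statement) =====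
-- stated objective: alternative
-- what changed: A's single pass keeps a running maximum stage and resets the result list every time the stage increases; B makes two passes: pass 1 only computes the maximum nesting depth, pass 2 collects exactly the substrings closed at that depth, so no result list is ever discarded.
import Mathlib
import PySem

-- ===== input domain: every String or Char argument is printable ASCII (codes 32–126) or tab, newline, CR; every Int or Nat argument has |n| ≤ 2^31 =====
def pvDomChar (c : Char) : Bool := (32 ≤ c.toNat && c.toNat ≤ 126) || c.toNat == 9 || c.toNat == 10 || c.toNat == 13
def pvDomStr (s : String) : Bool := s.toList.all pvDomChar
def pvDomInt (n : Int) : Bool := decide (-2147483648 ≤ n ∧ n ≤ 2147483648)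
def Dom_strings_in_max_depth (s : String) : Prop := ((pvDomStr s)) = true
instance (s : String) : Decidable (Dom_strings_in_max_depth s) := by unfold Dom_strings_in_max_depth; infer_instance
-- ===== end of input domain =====

-- B replaces A's one-pass loop with running-max and result resets by two linear passes
-- (pass 1 finds the maximum depth, pass 2 collects the substrings closed at it); objective: alternative decomposition, same cost.

-- ===== PORT A =====
-- A's loop body: state = (stage, start_index, result, current_stage), item = (index, symbol)
def pvStepA (cs : List Char) (st : Int × Int × List String × Int) (p : Int × Char) :
    Int × Int × List String × Int :=
  let stage := st.1; let start_index := st.2.1; let result := st.2.2.1; let current_stage := st.2.2.2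
  let index := p.1; let symbol := p.2
  let st' : Int × Int × List String × Int :=
    if symbol = '(' then (stage, index + 1, result, current_stage + 1)
    else if symbol = ')' then
      (stage, start_index,
        (if current_stage = stage then
           result ++ [String.ofList (PySem.List.slice cs (some start_index) (some index))]
         else result),
        current_stage - 1)
    else (stage, start_index, result, current_stage)
  if st'.2.2.2 > st'.1 then (st'.2.2.2, st'.2.1, ([] : List String), st'.2.2.2) else st'

def strings_in_max_depth (s : String) : List String :=
  if PySem.Str.isIn "(" s = false then [s]
  else
    ((PySem.List.enumerate s.toList 0).foldl (pvStepA s.toList) (0, 0, [], 0)).2.2.1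

-- ===== PORT B =====
-- B pass 1 body: state = (depth, max_depth)
def pvStepB1 (dm : Int × Int) (c : Char) : Int × Int :=
  if c = '(' then (dm.1 + 1, if dm.1 + 1 > dm.2 then dm.1 + 1 else dm.2)
  else if c = ')' then (dm.1 - 1, dm.2)
  else dm

-- B pass 2 body: state = (depth, start, result), item = (index, ch)
def pvStepB2 (cs : List Char) (md : Int) (st : Int × Int × List String) (p : Int × Char) :
    Int × Int × List String :=
  if p.2 = '(' then (st.1 + 1, p.1 + 1, st.2.2)
  else if p.2 = ')' then
    (st.1 - 1, st.2.1,
      if st.1 = md then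
        st.2.2 ++ [String.ofList (PySem.List.slice cs (some st.2.1) (some p.1))]
      else st.2.2)
  else st

def strings_in_max_depth_alt (s : String) : List String :=
  if PySem.Str.isIn "(" s = false then [s]
  else
    let md := (s.toList.foldl pvStepB1 (0, 0)).2
    ((PySem.List.enumerate s.toList 0).foldl (pvStepB2 s.toList md) (0, 0, [])).2.2

-- ===== PRECONDITION & SPEC =====
def Spec_strings_in_max_depth (s : String) (out : List String) : Prop := out = strings_in_max_depth_alt s
instance (s : String) (out : List String) : Decidable (Spec_strings_in_max_depth s out) := by unfold Spec_strings_in_max_depth; infer_instance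

-- ===== CLAIM (what is proved, stated in full; the proofs are below) =====
def Claim_equal_strings_in_max_depth : Prop := ∀ (s : String), Dom_strings_in_max_depth s → Spec_strings_in_max_depth s (strings_in_max_depth s)

-- ===== LEMMAS AND PROOFS =====

-- running maximum of the depth over t, starting from depth d (includes each post-step depth)
def pvRunMax (d : Int) : List Char → Int
  | [] => d
  | c :: t =>
    let d' := if c = '(' then d + 1 else if c = ')' then d - 1 else d
    max d' (pvRunMax d' t)

-- reference collector: the substrings closed at depth md, scanning t from index i with depth d, start start
def pvColl (cs : List Char) (md : Int) : Int → Int → Int → List Char → List String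
  | _, _, _, [] => []
  | d, start, i, c :: t =>
    if c = '(' then pvColl cs md (d + 1) (i + 1) (i + 1) t
    else if c = ')' then
      (if d = md then [String.ofList (PySem.List.slice cs (some start) (some i))] else []) ++
        pvColl cs md (d - 1) start (i + 1) t
    else pvColl cs md d start (i + 1) t

theorem pvB1_spec (t : List Char) (d m : Int) (h : d ≤ m) :
    (t.foldl pvStepB1 (d, m)).2 = max m (pvRunMax d t) := by
  induction t generalizing d m with
  | nil => simp [pvRunMax]; omega
  | cons c t ih =>
    by_cases h1 : c = '('
    · subst h1
      simp only [List.foldl_cons, pvStepB1, pvRunMax, Char.reduceEq, reduceIte]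
      rw [ih (d + 1) _ (by split <;> omega)]
      split <;> omega
    · by_cases h2 : c = ')'
      · subst h2
        simp only [List.foldl_cons, pvStepB1, pvRunMax, Char.reduceEq, reduceIte]
        rw [ih (d - 1) m (by omega)]
        omega
      · simp only [List.foldl_cons, pvStepB1, h1, h2, if_false, pvRunMax]
        rw [ih d m h]
        omega

theorem pvB2_spec (cs : List Char) (md : Int) (t : List Char) (d start i : Int) (res : List String) :
    ((PySem.List.enumerate t i).foldl (pvStepB2 cs md) (d, start, res)).2.2 =
      res ++ pvColl cs md d start i t := by
  induction t generalizing d start i res with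
  | nil => simp [PySem.List.enumerate_nil, pvColl]
  | cons c t ih =>
    rw [PySem.List.enumerate_cons]
    by_cases h1 : c = '('
    · subst h1
      simp only [List.foldl_cons, pvStepB2, pvColl, Char.reduceEq, reduceIte]
      rw [ih]
    · by_cases h2 : c = ')'
      · subst h2
        simp only [List.foldl_cons, pvStepB2, pvColl, Char.reduceEq, reduceIte]
        rw [ih]
        by_cases hd : d = md <;> simp [hd]
      · simp only [List.foldl_cons, pvStepB2, h1, h2, if_false, pvColl]
        rw [ih]

theorem pvA_spec (cs : List Char) (t : List Char) (m start d i : Int) (res : List String)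
    (h : d ≤ m) :
    ((PySem.List.enumerate t i).foldl (pvStepA cs) (m, start, res, d)).2.2.1 =
      (if pvRunMax d t ≤ m then res else []) ++ pvColl cs (max m (pvRunMax d t)) d start i t := by
  induction t generalizing m start d i res with
  | nil => simp [PySem.List.enumerate_nil, pvRunMax, pvColl, h]
  | cons c t ih =>
    rw [PySem.List.enumerate_cons, List.foldl_cons]
    by_cases h1 : c = '('
    · subst h1
      simp only [pvStepA, Char.reduceEq, reduceIte, pvRunMax, pvColl]
      by_cases hgt : d + 1 > m
      · simp only [hgt, reduceIte]
        rw [ih _ _ _ _ _ (le_refl (d + 1))]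
        generalize pvRunMax (d + 1) t = r
        have e2 : ¬ (max (d + 1) r ≤ m) := by omega
        have e3 : max m (max (d + 1) r) = max (d + 1) r := by omega
        rw [if_neg e2, e3]
        by_cases hc : r ≤ d + 1 <;> simp [hc]
      · simp only [hgt, reduceIte]
        rw [ih _ _ _ _ _ (by omega : d + 1 ≤ m)]
        generalize pvRunMax (d + 1) t = r
        have e3 : max m (max (d + 1) r) = max m r := by omega
        rw [e3]
        by_cases hc : r ≤ m
        · rw [if_pos hc, if_pos (by omega : max (d + 1) r ≤ m)]
        · rw [if_neg hc, if_neg (by omega : ¬ max (d + 1) r ≤ m)]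
    · by_cases h2 : c = ')'
      · subst h2
        simp only [pvStepA, Char.reduceEq, reduceIte, pvRunMax, pvColl]
        have hng : ¬ (d - 1 > m) := by omega
        simp only [hng, reduceIte]
        rw [ih _ _ _ _ _ (by omega : d - 1 ≤ m)]
        generalize pvRunMax (d - 1) t = r
        have e3 : max m (max (d - 1) r) = max m r := by omega
        rw [e3]
        by_cases hc : r ≤ m
        · rw [if_pos hc, if_pos (by omega : max (d - 1) r ≤ m)]
          have hm : max m r = m := by omega
          rw [hm]
          by_cases hd : d = m <;> simp [hd]
        · rw [if_neg hc, if_neg (by omega : ¬ max (d - 1) r ≤ m)]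
          have hd : ¬ (d = max m r) := by omega
          simp [hd]
      · simp only [pvStepA, h1, h2, if_false, pvRunMax, pvColl]
        have hng : ¬ (d > m) := by omega
        simp only [hng, reduceIte]
        rw [ih _ _ _ _ _ h]
        generalize pvRunMax d t = r
        have e3 : max m (max d r) = max m r := by omega
        rw [e3]
        by_cases hc : r ≤ m
        · rw [if_pos hc, if_pos (by omega : max d r ≤ m)]
        · rw [if_neg hc, if_neg (by omega : ¬ max d r ≤ m)]

theorem strings_in_max_depth_spec : Claim_equal_strings_in_max_depth := by
  intro s _
  unfold Spec_strings_in_max_depth strings_in_max_depth strings_in_max_depth_alt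
  by_cases hin : PySem.Str.isIn "(" s = false
  · rw [if_pos hin, if_pos hin]
  · rw [if_neg hin, if_neg hin]
    rw [pvA_spec _ _ _ _ _ _ _ (le_refl 0), pvB2_spec, pvB1_spec _ _ _ (le_refl 0)]
    simp
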